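-- pv_equiv track=rewrite | github.com/linhdvu14/cp-sols | sols/CodeForces/1624_d3/E_Masha_forgetful.py | solve
-- ===== SOURCE A (Python) =====
-- def solve(N, M, strs, S):
--     # rmb bigrams and trigrams
--     known = {}
--     for si, s in enumerate(strs):
--         for i in range(M):
--             if i+2 <= M: known[s[i:i+2]] = (i+1, i+2, si+1)
--             if i+3 <= M: known[s[i:i+3]] = (i+1, i+3, si+1)
--
--     # dp[i] = S[i:] is good
--     dp = [False]*M + [True]
--     for i in range(M-1, -1, -1):
--         if i+2 <= M and S[i:i+2] in known and dp[i+2]: dp[i] = True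
--         if i+3 <= M and S[i:i+3] in known and dp[i+3]: dp[i] = True
--
--     if not dp[0]: return -1, []
--
--     res = []
--     i = 0
--     while i < M:
--         if i+2 <= M and dp[i+2]:
--             res.append(known[S[i:i+2]])
--             i += 2
--         else:
--             res.append(known[S[i:i+3]])
--             i += 3
--
--     return len(res), res
-- ===== SOURCE B (Python) =====
-- def solve(N, M, strs, S):
--     # same known dict as a scan over strs (same insertion order, last occurrence wins)
--     known = {s[i:i+L]: (i+1, i+L, si+1)
--              for si, s in enumerate(strs)
--              for i in range(M)
--              for L in (2, 3) if i + L <= M}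
--
--     # on-demand top-down decomposition of S[i:] (greedy: length 2 tried before 3),
--     # memoized DFS driven by an explicit stack; memo[i] is a linked chain of segments
--     # (seg, tail), () for the empty suffix, None if S[i:] cannot be decomposed
--     memo = {}
--     stack = [0]
--     while stack:
--         i = stack.pop()
--         if i in memo:
--             continue
--         if i >= M:
--             memo[i] = ()
--             continue
--         deps = [i + L for L in (2, 3)
--                 if i + L <= M and S[i:i+L] in known and (i + L) not in memo]
--         if deps:
--             stack.append(i)
--             stack.extend(deps)
--             continue
--         r = None
--         for L in (2, 3):
--             if i + L <= M and S[i:i+L] in known and memo[i+L] is not None: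
--                 r = (known[S[i:i+L]], memo[i+L])
--                 break
--         memo[i] = r
--
--     res = memo[0]
--     if res is None:
--         return -1, []
--     out = []
--     while res:
--         out.append(res[0])
--         res = res[1]
--     return len(out), out
-- ===== Notes on version B (the rewrite author's own statement) =====
-- stated objective: alternative
-- what changed: B builds known via a dict comprehension and replaces A's bottom-up boolean dp table plus a second forward greedy scan with an on-demand top-down memoized DFS driven by an explicit stack, whose memo stores the greedy decomposition of each visited suffix as shared linked (segment, tail) chains; only positions reachable from 0 are visited and the answer is read off by flattening memo[0].
import Mathlib
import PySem

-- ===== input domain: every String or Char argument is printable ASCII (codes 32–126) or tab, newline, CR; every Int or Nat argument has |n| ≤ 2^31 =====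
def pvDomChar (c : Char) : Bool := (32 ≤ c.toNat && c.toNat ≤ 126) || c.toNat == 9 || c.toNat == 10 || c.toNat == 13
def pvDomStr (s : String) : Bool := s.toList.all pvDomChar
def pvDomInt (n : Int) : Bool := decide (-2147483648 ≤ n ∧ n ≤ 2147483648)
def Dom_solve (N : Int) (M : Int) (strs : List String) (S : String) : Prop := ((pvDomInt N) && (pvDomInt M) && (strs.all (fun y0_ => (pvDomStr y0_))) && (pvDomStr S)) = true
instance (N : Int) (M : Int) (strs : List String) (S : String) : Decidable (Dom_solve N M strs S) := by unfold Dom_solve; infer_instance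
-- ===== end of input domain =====

-- B replaces A's bottom-up boolean dp table + second forward greedy scan by an on-demand
-- top-down memoized DFS driven by an explicit stack, storing shared linked segment chains
-- (objective: alternative).

def pvSlc (s : List Char) (a b : Int) : List Char := PySem.List.slice s (some a) (some b)

-- ===== PORT A =====
-- Python's dp list (all indexing is within bounds in A) is carried as an Array Bool;
-- the bounds guards in pvAGet/pvASet only make the operations total.
def pvAGet (a : Array Bool) (i : Int) : Bool :=
  if h : 0 ≤ i ∧ i.toNat < a.size then a[i.toNat] else false

def pvASet (a : Array Bool) (i : Int) (v : Bool) : Array Bool :=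
  if h : 0 ≤ i ∧ i.toNat < a.size then a.set i.toNat v h.2 else a

def pvKnownA (M : Int) (strs : List String) : PySem.Dict (List Char) (Int × Int × Int) :=
  (PySem.List.enumerate strs 0).foldl
    (fun kn p =>
      (PySem.List.pyRange 0 M 1).foldl
        (fun kn i =>
          let kn := if i + 2 ≤ M then kn.insert (pvSlc p.2.toList i (i+2)) (i+1, i+2, p.1+1) else kn
          if i + 3 ≤ M then kn.insert (pvSlc p.2.toList i (i+3)) (i+1, i+3, p.1+1) else kn)
        kn)
    PySem.Dict.empty

def pvDpBody (kn : PySem.Dict (List Char) (Int × Int × Int)) (M : Int) (S : List Char)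
    (dp : Array Bool) (i : Int) : Array Bool :=
  let dp := if decide (i+2 ≤ M) && kn.contains (pvSlc S i (i+2)) && pvAGet dp (i+2)
            then pvASet dp i true else dp
  if decide (i+3 ≤ M) && kn.contains (pvSlc S i (i+3)) && pvAGet dp (i+3)
  then pvASet dp i true else dp

def pvDpA (kn : PySem.Dict (List Char) (Int × Int × Int)) (M : Int) (S : List Char) : Array Bool :=
  (PySem.List.pyRange (M-1) (-1) (-1)).foldl (pvDpBody kn M S)
    ((List.replicate M.toNat false ++ [true]).toArray)

def pvWalkA (kn : PySem.Dict (List Char) (Int × Int × Int)) (dp : Array Bool) (M : Int)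
    (S : List Char) (i : Int) (res : List (Int × Int × Int)) : List (Int × Int × Int) :=
  if h : i < M then
    if decide (i+2 ≤ M) && pvAGet dp (i+2) then
      pvWalkA kn dp M S (i+2) (res ++ [kn.getD (pvSlc S i (i+2)) (0,0,0)])
    else
      pvWalkA kn dp M S (i+3) (res ++ [kn.getD (pvSlc S i (i+3)) (0,0,0)])
  else res
termination_by (M - i).toNat
decreasing_by all_goals omega

def solve (N : Int) (M : Int) (strs : List String) (S : String) : Int × (List (Int × Int × Int)) :=
  let kn := pvKnownA M strs
  let dp := pvDpA kn M S.toList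
  if !(pvAGet dp 0) then (-1, [])
  else
    let res := pvWalkA kn dp M S.toList 0 []
    ((res.length : Int), res)

-- ===== PORT B =====
def pvPairsB (M : Int) (strs : List String) : List ((List Char) × (Int × Int × Int)) :=
  (PySem.List.enumerate strs 0).flatMap fun p =>
    (PySem.List.pyRange 0 M 1).flatMap fun i =>
      (([2, 3] : List Int).filter (fun L => decide (i + L ≤ M))).map fun L =>
        (pvSlc p.2.toList i (i+L), (i+1, i+L, p.1+1))

def pvKnownB (M : Int) (strs : List String) : PySem.Dict (List Char) (Int × Int × Int) :=
  (pvPairsB M strs).foldl (fun kn q => kn.insert q.1 q.2) PySem.Dict.empty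

-- memo chains: () ↦ nil, (seg, tail) ↦ cons seg tail
inductive PvCell where
  | nil : PvCell
  | cons : (Int × Int × Int) → PvCell → PvCell
deriving DecidableEq, Repr

-- B's memo dict has int keys that all lie in [0, max M 0]; it is carried as an
-- Array (Option (Option PvCell)) indexed by key: none = key absent, some v = memo[key] = v
-- (v = none is Python's None). The bounds guards only make get/set total.
def pvMemoGet (m : Array (Option (Option PvCell))) (i : Int) : Option (Option PvCell) :=
  if h : 0 ≤ i ∧ i.toNat < m.size then m[i.toNat] else none

def pvMemoSet (m : Array (Option (Option PvCell))) (i : Int) (v : Option PvCell) :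
    Array (Option (Option PvCell)) :=
  if h : 0 ≤ i ∧ i.toNat < m.size then m.set i.toNat (some v) h.2 else m

def pvDeps (kn : PySem.Dict (List Char) (Int × Int × Int)) (M : Int) (S : List Char)
    (memo : Array (Option (Option PvCell))) (i : Int) : List Int :=
  ([2, 3] : List Int).filterMap fun L =>
    if decide (i + L ≤ M) && kn.contains (pvSlc S i (i+L)) && (pvMemoGet memo (i+L)).isNone
    then some (i + L) else none

-- the resolution for-loop over L ∈ (2, 3) with break, unrolled
def pvResolve3 (kn : PySem.Dict (List Char) (Int × Int × Int)) (M : Int) (S : List Char)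
    (memo : Array (Option (Option PvCell))) (i : Int) : Option PvCell :=
  if decide (i+3 ≤ M) && kn.contains (pvSlc S i (i+3)) then
    match pvMemoGet memo (i+3) with
    | some (some t) => some (PvCell.cons (kn.getD (pvSlc S i (i+3)) (0,0,0)) t)
    | _ => none
  else none

def pvResolve (kn : PySem.Dict (List Char) (Int × Int × Int)) (M : Int) (S : List Char)
    (memo : Array (Option (Option PvCell))) (i : Int) : Option PvCell :=
  if decide (i+2 ≤ M) && kn.contains (pvSlc S i (i+2)) then
    match pvMemoGet memo (i+2) with
    | some (some t) => some (PvCell.cons (kn.getD (pvSlc S i (i+2)) (0,0,0)) t)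
    | _ => pvResolve3 kn M S memo i
  else pvResolve3 kn M S memo i

-- the while-stack loop; the stack top is the list head (Python pops/pushes at the end);
-- the fuel argument only makes the loop total (3*(max M 0 + 2) iterations always suffice,
-- as the proofs below show)
def pvLoop (kn : PySem.Dict (List Char) (Int × Int × Int)) (M : Int) (S : List Char) :
    Nat → List Int → Array (Option (Option PvCell)) → Array (Option (Option PvCell))
  | 0, _, memo => memo
  | _+1, [], memo => memo
  | f+1, i :: rest, memo =>
    match pvMemoGet memo i with
    | some _ => pvLoop kn M S f rest memo
    | none =>
      if M ≤ i then pvLoop kn M S f rest (pvMemoSet memo i (some PvCell.nil))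
      else
        let deps := pvDeps kn M S memo i
        if deps.isEmpty then
          pvLoop kn M S f rest (pvMemoSet memo i (pvResolve kn M S memo i))
        else
          pvLoop kn M S f (deps.reverse ++ i :: rest) memo

def pvFlatten : PvCell → List (Int × Int × Int)
  | PvCell.nil => []
  | PvCell.cons s t => s :: pvFlatten t

def solve_alt (N : Int) (M : Int) (strs : List String) (S : String) : Int × (List (Int × Int × Int)) :=
  let kn := pvKnownB M strs
  let memo := pvLoop kn M S.toList (3 * (M.toNat + 2)) [0] (Array.replicate (M.toNat + 1) none)
  match (pvMemoGet memo 0).getD none with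
  | none => (-1, [])
  | some c =>
    let out := pvFlatten c
    ((out.length : Int), out)

-- ===== PRECONDITION & SPEC =====
def Spec_solve (N : Int) (M : Int) (strs : List String) (S : String) (out : Int × (List (Int × Int × Int))) : Prop := out = solve_alt N M strs S
instance (N : Int) (M : Int) (strs : List String) (S : String) (out : Int × (List (Int × Int × Int))) : Decidable (Spec_solve N M strs S out) := by unfold Spec_solve; infer_instance

-- ===== CLAIM (what is proved, stated in full; the proofs are below) =====
def Claim_equal_solve : Prop := ∀ (N : Int) (M : Int) (strs : List String) (S : String), Dom_solve N M strs S → Spec_solve N M strs S (solve N M strs S)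

-- ===== LEMMAS AND PROOFS =====

-- "cs is a key of known": some bigram/trigram of some string equals cs
def pvHasKey (M : Int) (strs : List String) (cs : List Char) : Bool :=
  strs.any fun s => (PySem.List.pyRange 0 M 1).any fun i =>
    (decide (i+2 ≤ M) && (pvSlc s.toList i (i+2) == cs)) ||
    (decide (i+3 ≤ M) && (pvSlc s.toList i (i+3) == cs))

-- "S[i:] decomposes into known bigrams/trigrams"
def pvGood (M : Int) (strs : List String) (S : List Char) (i : Int) : Bool :=
  (i == M) ||
  (if _h : i + 2 ≤ M then pvHasKey M strs (pvSlc S i (i+2)) && pvGood M strs S (i+2) else false) ||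
  (if _h : i + 3 ≤ M then pvHasKey M strs (pvSlc S i (i+3)) && pvGood M strs S (i+3) else false)
termination_by (M - i).toNat
decreasing_by all_goals omega

-- memo-free specification of the decomposition B computes for each suffix
def pvFPure (M : Int) (strs : List String) (S : List Char) (i : Int) :
    Option (List (Int × Int × Int)) :=
  if h : M ≤ i then some []
  else
    if decide (i+2 ≤ M) && pvHasKey M strs (pvSlc S i (i+2)) then
      match pvFPure M strs S (i+2) with
      | some t => some ((pvKnownB M strs).getD (pvSlc S i (i+2)) (0,0,0) :: t)
      | none =>
        if decide (i+3 ≤ M) && pvHasKey M strs (pvSlc S i (i+3)) then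
          match pvFPure M strs S (i+3) with
          | some t => some ((pvKnownB M strs).getD (pvSlc S i (i+3)) (0,0,0) :: t)
          | none => none
        else none
    else
      if decide (i+3 ≤ M) && pvHasKey M strs (pvSlc S i (i+3)) then
        match pvFPure M strs S (i+3) with
        | some t => some ((pvKnownB M strs).getD (pvSlc S i (i+3)) (0,0,0) :: t)
        | none => none
      else none
termination_by (M - i).toNat
decreasing_by all_goals omega

def pvToCell : List (Int × Int × Int) → PvCell
  | [] => PvCell.nil
  | s :: t => PvCell.cons s (pvToCell t)

theorem pvFlatten_toCell (l : List (Int × Int × Int)) : pvFlatten (pvToCell l) = l := by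
  induction l with
  | nil => rfl
  | cons s t ih => simp [pvToCell, pvFlatten, ih]

theorem slc_take2 (S : List Char) (i : Int) (h : 0 ≤ i) :
    pvSlc S i (i+2) = (pvSlc S i (i+3)).take 2 := by
  unfold pvSlc
  rw [PySem.List.slice_toNat S h (by omega), PySem.List.slice_toNat S h (by omega)]
  rw [List.take_take]
  congr 1
  omega

theorem pvASet_size (a : Array Bool) (k : Int) (v : Bool) : (pvASet a k v).size = a.size := by
  unfold pvASet; split <;> simp

theorem pvAGet_set (a : Array Bool) (k j : Int) (hk0 : 0 ≤ k) (hk : k.toNat < a.size)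
    (hj0 : 0 ≤ j) (hj : j.toNat < a.size) :
    pvAGet (pvASet a k true) j = if j = k then true else pvAGet a j := by
  have hset : pvASet a k true = a.set k.toNat true hk := by
    unfold pvASet; rw [dif_pos ⟨hk0, hk⟩]
  rw [hset]
  unfold pvAGet
  rw [dif_pos (show 0 ≤ j ∧ j.toNat < (a.set k.toNat true hk).size by
    refine ⟨hj0, ?_⟩; simpa using hj)]
  rw [dif_pos ⟨hj0, hj⟩]
  rw [Array.getElem_set]
  by_cases h : j = k
  · have : k.toNat = j.toNat := by omega
    simp [h, this]
  · have : k.toNat ≠ j.toNat := by omega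
    simp [this, h]

theorem good_cases (M : Int) (strs : List String) (S : List Char) (i : Int)
    (h : pvGood M strs S i = true) (hi : i < M) :
    (i+2 ≤ M ∧ pvHasKey M strs (pvSlc S i (i+2)) = true ∧ pvGood M strs S (i+2) = true) ∨
    (i+3 ≤ M ∧ pvHasKey M strs (pvSlc S i (i+3)) = true ∧ pvGood M strs S (i+3) = true) := by
  rw [pvGood] at h
  have hne : (i == M) = false := by simp; omega
  rw [hne] at h
  simp only [Bool.false_or, Bool.or_eq_true] at h
  rcases h with h | h
  · left
    by_cases h2 : i + 2 ≤ M
    · rw [dif_pos h2] at h; simp at h; exact ⟨h2, h.1, h.2⟩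
    · rw [dif_neg h2] at h; exact absurd h (by simp)
  · right
    by_cases h3 : i + 3 ≤ M
    · rw [dif_pos h3] at h; simp at h; exact ⟨h3, h.1, h.2⟩
    · rw [dif_neg h3] at h; exact absurd h (by simp)

theorem hasKey_take2 (M : Int) (strs : List String) (cs : List Char)
    (h : pvHasKey M strs cs = true) : pvHasKey M strs (cs.take 2) = true := by
  unfold pvHasKey at h ⊢
  simp only [List.any_eq_true] at h ⊢
  obtain ⟨s, hs, i, hi, hcase⟩ := h
  have hi0 : 0 ≤ i := by
    rcases (PySem.List.mem_pyRange_one).1 hi with ⟨h1, _⟩; exact h1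
  refine ⟨s, hs, i, hi, ?_⟩
  simp only [Bool.or_eq_true, Bool.and_eq_true, decide_eq_true_eq, beq_iff_eq] at hcase ⊢
  rcases hcase with ⟨h2, heq⟩ | ⟨h3, heq⟩
  · left
    refine ⟨h2, ?_⟩
    rw [← heq]
    unfold pvSlc
    rw [PySem.List.slice_toNat _ hi0 (by omega)]
    rw [List.take_take]
    congr 1
    omega
  · left
    refine ⟨by omega, ?_⟩
    rw [← heq, slc_take2 _ _ hi0]

theorem good_hasKey2 (M : Int) (strs : List String) (S : List Char) (i : Int)
    (h : pvGood M strs S i = true) (hi : i < M) (h0 : 0 ≤ i) :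
    pvHasKey M strs (pvSlc S i (i+2)) = true := by
  rcases good_cases M strs S i h hi with ⟨_, hk, _⟩ | ⟨_, hk, _⟩
  · exact hk
  · rw [slc_take2 _ _ h0]
    exact hasKey_take2 _ _ _ hk

theorem foldl_insert_contains {κ ν : Type} [BEq κ] [LawfulBEq κ]
    (l : List (κ × ν)) (d : PySem.Dict κ ν) (cs : κ) :
    (l.foldl (fun kn q => kn.insert q.1 q.2) d).contains cs
      = (d.contains cs || l.any (fun q => cs == q.1)) := by
  induction l generalizing d with
  | nil => simp
  | cons p t ih =>
    simp only [List.foldl_cons, List.any_cons]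
    rw [ih, PySem.Dict.contains_insert]
    cases h : cs == p.1 <;> cases d.contains cs <;> simp

theorem known_eq (M : Int) (strs : List String) : pvKnownA M strs = pvKnownB M strs := by
  unfold pvKnownA pvKnownB pvPairsB
  rw [List.foldl_flatMap]
  apply PySem.List.foldl_congr_mem
  intro kn p _
  rw [List.foldl_flatMap]
  apply PySem.List.foldl_congr_mem
  intro kn' i hi
  have hi0 : 0 ≤ i := ((PySem.List.mem_pyRange_one).1 hi).1
  by_cases h3 : i + 3 ≤ M
  · have h2 : i + 2 ≤ M := by omega
    simp [h2, h3, List.filter]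
  · by_cases h2 : i + 2 ≤ M
    · simp [h2, h3, List.filter]
    · simp [h2, h3, List.filter]

theorem beq_symm_list (a b : List Char) : (a == b) = (b == a) := by
  cases h : a == b <;> cases h' : b == a <;> simp_all

theorem contains_knownB (M : Int) (strs : List String) (cs : List Char) :
    (pvKnownB M strs).contains cs = pvHasKey M strs cs := by
  unfold pvKnownB pvPairsB pvHasKey
  rw [foldl_insert_contains]
  have hemp : (PySem.Dict.empty : PySem.Dict (List Char) (Int × Int × Int)).contains cs = false := by
    rw [PySem.Dict.contains_eq_isSome_get?, PySem.Dict.get?_empty]; rfl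
  rw [hemp, Bool.false_or, List.any_flatMap]
  conv_rhs => rw [← PySem.List.map_snd_enumerate strs 0, List.any_map]
  congr 1
  funext p
  simp only [Function.comp]
  rw [List.any_flatMap]
  congr 1
  funext i
  rw [List.any_map, List.any_filter]
  simp only [Function.comp, List.any_cons, List.any_nil, Bool.or_false]
  rw [beq_symm_list cs, beq_symm_list cs]

theorem good_unfold (M : Int) (strs : List String) (S : List Char) (k : Int) (hkM : k < M) :
    pvGood M strs S k =
      ((decide (k+2 ≤ M) && pvHasKey M strs (pvSlc S k (k+2)) && pvGood M strs S (k+2)) ||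
       (decide (k+3 ≤ M) && pvHasKey M strs (pvSlc S k (k+3)) && pvGood M strs S (k+3))) := by
  rw [pvGood]
  have hne : (k == M) = false := by simp; omega
  rw [hne, Bool.false_or]
  by_cases h2 : k+2 ≤ M <;> by_cases h3 : k+3 ≤ M <;> simp [h2, h3]

-- feasibility of pvFPure
theorem pvFPure_isSome (M : Int) (strs : List String) (S : List Char) :
    ∀ (n : Nat) (i : Int), (M - i).toNat = n → 0 ≤ i → i ≤ M →
      ((pvFPure M strs S i).isSome = pvGood M strs S i) := by
  intro n
  induction n using Nat.strong_induction_on with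
  | _ n ih =>
    intro i hn h0 hiM
    by_cases hMi : M ≤ i
    · have hieq : i = M := by omega
      subst hieq
      rw [pvFPure, dif_pos hMi, pvGood]
      simp
    · have hilt : i < M := by omega
      rw [pvFPure, dif_neg hMi, good_unfold M strs S i hilt]
      have ih2 : i + 2 ≤ M → (pvFPure M strs S (i+2)).isSome = pvGood M strs S (i+2) :=
        fun h2 => ih (M - (i+2)).toNat (by omega) (i+2) rfl (by omega) h2
      have ih3 : i + 3 ≤ M → (pvFPure M strs S (i+3)).isSome = pvGood M strs S (i+3) :=
        fun h3 => ih (M - (i+3)).toNat (by omega) (i+3) rfl (by omega) h3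
      cases hc2 : (decide (i+2 ≤ M) && pvHasKey M strs (pvSlc S i (i+2))) with
      | true =>
        have h2M : i + 2 ≤ M := by
          have := hc2
          simp only [Bool.and_eq_true, decide_eq_true_eq] at this
          exact this.1
        cases hp2 : pvFPure M strs S (i+2) with
        | some t =>
          have hg2 : pvGood M strs S (i+2) = true := by
            rw [← ih2 h2M, hp2]; rfl
          simp [hc2, hp2, hg2]
        | none =>
          have hg2 : pvGood M strs S (i+2) = false := by
            rw [← ih2 h2M, hp2]; rfl
          simp only [hp2, hg2, Bool.and_false, Bool.false_or]
          cases hc3 : (decide (i+3 ≤ M) && pvHasKey M strs (pvSlc S i (i+3))) with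
          | true =>
            have h3M : i + 3 ≤ M := by
              have := hc3
              simp only [Bool.and_eq_true, decide_eq_true_eq] at this
              exact this.1
            cases hp3 : pvFPure M strs S (i+3) with
            | some t3 =>
              have hg3 : pvGood M strs S (i+3) = true := by
                rw [← ih3 h3M, hp3]; rfl
              simp [hc3, hp3, hg3]
            | none =>
              have hg3 : pvGood M strs S (i+3) = false := by
                rw [← ih3 h3M, hp3]; rfl
              simp [hc3, hp3, hg3]
          | false =>
            simp only [Bool.false_eq_true, if_false]
            cases h3M : decide (i+3 ≤ M) with
            | true =>
              have hk3f : pvHasKey M strs (pvSlc S i (i+3)) = false := by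
                cases hk : pvHasKey M strs (pvSlc S i (i+3)) with
                | true => rw [h3M, hk] at hc3; simp at hc3
                | false => rfl
              simp [hc2, hc3, hk3f]
            | false =>
              simp [hc2, h3M]
      | false =>
        simp only [Bool.false_and, Bool.false_or, Bool.false_eq_true, if_false]
        cases hc3 : (decide (i+3 ≤ M) && pvHasKey M strs (pvSlc S i (i+3))) with
        | true =>
          have h3M : i + 3 ≤ M := by
            have := hc3
            simp only [Bool.and_eq_true, decide_eq_true_eq] at this
            exact this.1
          cases hp3 : pvFPure M strs S (i+3) with
          | some t3 =>
            have hg3 : pvGood M strs S (i+3) = true := by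
              rw [← ih3 h3M, hp3]; rfl
            simp [hc3, hp3, hg3]
          | none =>
            have hg3 : pvGood M strs S (i+3) = false := by
              rw [← ih3 h3M, hp3]; rfl
            simp [hc3, hp3, hg3]
        | false =>
          cases h3M : decide (i+3 ≤ M) with
          | true =>
            have hk3f : pvHasKey M strs (pvSlc S i (i+3)) = false := by
              cases hk : pvHasKey M strs (pvSlc S i (i+3)) with
              | true => rw [h3M, hk] at hc3; simp at hc3
              | false => rfl
            simp [hc3, hk3f]
          | false =>
            simp [hc3, h3M]

-- A's greedy walk produces exactly pvFPure's list on feasible positions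
theorem walk_eq_pure (M : Int) (strs : List String) (S : List Char) (hM : 0 ≤ M)
    (dp : Array Bool)
    (hdp : ∀ j : Int, 0 ≤ j → j ≤ M →
      pvAGet dp j = pvGood M strs S j) :
    ∀ (n : Nat) (i : Int) (res : List (Int × Int × Int)), (M - i).toNat = n → 0 ≤ i → i ≤ M →
      pvGood M strs S i = true →
      pvWalkA (pvKnownB M strs) dp M S i res = res ++ (pvFPure M strs S i).getD [] := by
  intro n
  induction n using Nat.strong_induction_on with
  | _ n ih =>
    intro i res hn h0 hiM hg
    by_cases hi : i < M
    · rw [pvWalkA, dif_pos hi, pvFPure, dif_neg (by omega : ¬ M ≤ i)]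
      have hk2 : pvHasKey M strs (pvSlc S i (i+2)) = true := good_hasKey2 M strs S i hg hi h0
      have h2M : i + 2 ≤ M := by
        rcases good_cases M strs S i hg hi with ⟨h2, _, _⟩ | ⟨h3, _, _⟩ <;> omega
      have hsome2 : (pvFPure M strs S (i+2)).isSome = pvGood M strs S (i+2) :=
        pvFPure_isSome M strs S _ (i+2) rfl (by omega) h2M
      have hcond : (decide (i+2 ≤ M) && pvAGet dp (i+2))
          = pvGood M strs S (i+2) := by
        rw [hdp (i+2) (by omega) h2M]
        simp [h2M]
      rw [hcond]
      rw [if_pos (show (decide (i+2 ≤ M) && pvHasKey M strs (pvSlc S i (i+2))) = true by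
        simp [h2M, hk2])]
      cases hg2 : pvGood M strs S (i+2) with
      | true =>
        obtain ⟨t, ht⟩ : ∃ t, pvFPure M strs S (i+2) = some t := by
          cases hp : pvFPure M strs S (i+2) with
          | some t => exact ⟨t, rfl⟩
          | none => rw [hp, hg2] at hsome2; simp at hsome2
        rw [ht]
        simp only [if_pos rfl]
        rw [ih (M - (i+2)).toNat (by omega) (i+2) _ rfl (by omega) h2M hg2, ht]
        simp
      | false =>
        rw [if_neg (by simp)]
        have hfp2 : pvFPure M strs S (i+2) = none := by
          cases hp : pvFPure M strs S (i+2) with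
          | some t => rw [hp, hg2] at hsome2; simp at hsome2
          | none => rfl
        rw [hfp2]
        have h3 : i+3 ≤ M ∧ pvHasKey M strs (pvSlc S i (i+3)) = true ∧
            pvGood M strs S (i+3) = true := by
          rcases good_cases M strs S i hg hi with ⟨_, _, hc⟩ | h
          · rw [hc] at hg2; cases hg2
          · exact h
        have hsome3 : (pvFPure M strs S (i+3)).isSome = pvGood M strs S (i+3) :=
          pvFPure_isSome M strs S _ (i+3) rfl (by omega) h3.1
        obtain ⟨t3, ht3⟩ : ∃ t, pvFPure M strs S (i+3) = some t := by
          cases hp : pvFPure M strs S (i+3) with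
          | some t => exact ⟨t, rfl⟩
          | none => rw [hp, h3.2.2] at hsome3; simp at hsome3
        rw [if_pos (show (decide (i+3 ≤ M) && pvHasKey M strs (pvSlc S i (i+3))) = true by
          simp [h3.1, h3.2.1]), ht3]
        rw [ih (M - (i+3)).toNat (by omega) (i+3) _ rfl (by omega) h3.1 h3.2.2, ht3]
        simp
    · rw [pvWalkA, dif_neg hi, pvFPure, dif_pos (by omega : M ≤ i)]
      simp

theorem dp_body_getD (M : Int) (strs : List String) (S : List Char) (hM : 0 ≤ M)
    (k : Int) (hk0 : 0 ≤ k) (hkM : k ≤ M - 1) (dp : Array Bool)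
    (hlen : dp.size = M.toNat + 1)
    (hgt : ∀ j : Int, k < j → j ≤ M → pvAGet dp j = pvGood M strs S j)
    (hkf : pvAGet dp k = false) :
    (pvDpBody (pvKnownB M strs) M S dp k).size = dp.size ∧
    ∀ j : Int, 0 ≤ j → j ≤ M →
      pvAGet (pvDpBody (pvKnownB M strs) M S dp k) j
        = if j = k then pvGood M strs S k else pvAGet dp j := by
  have hklt : k.toNat < dp.size := by omega
  set B2 : Bool := decide (k+2 ≤ M) && pvHasKey M strs (pvSlc S k (k+2)) && pvGood M strs S (k+2) with hB2
  set B3 : Bool := decide (k+3 ≤ M) && pvHasKey M strs (pvSlc S k (k+3)) && pvGood M strs S (k+3) with hB3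
  have hcond2 : (decide (k+2 ≤ M) && (pvKnownB M strs).contains (pvSlc S k (k+2)) &&
        pvAGet dp (k+2)) = B2 := by
    rw [contains_knownB, hB2]
    by_cases h2 : k+2 ≤ M
    · rw [hgt (k+2) (by omega) (by omega)]
    · simp [h2]
  set dp1 : Array Bool := if B2 = true then pvASet dp k true else dp with hdp1
  have hlen1 : dp1.size = dp.size := by
    rw [hdp1]; split <;> simp [pvASet_size]
  have hget1 : ∀ j : Int, 0 ≤ j → j.toNat < dp.size →
      pvAGet dp1 j
        = if j = k ∧ B2 = true then true else pvAGet dp j := by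
    intro j hj0 hj
    rw [hdp1]
    cases hb : B2 with
    | false => simp [hb]
    | true =>
      simp only [eq_self_iff_true, if_true]
      rw [pvAGet_set dp k j hk0 hklt hj0 hj]
      by_cases hjk : j = k
      · simp [hjk]
      · simp [hjk]
  have hcond3 : (decide (k+3 ≤ M) && (pvKnownB M strs).contains (pvSlc S k (k+3)) &&
        pvAGet dp1 (k+3)) = B3 := by
    rw [contains_knownB, hB3]
    by_cases h3 : k+3 ≤ M
    · rw [hget1 (k+3) (by omega) (by omega)]
      have hne : ¬ (k+3 = k ∧ B2 = true) := by
        rintro ⟨h, -⟩; omega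
      rw [if_neg hne, hgt (k+3) (by omega) (by omega)]
    · simp [h3]
  have hbody0 : pvDpBody (pvKnownB M strs) M S dp k =
      (if (decide (k+3 ≤ M) && (pvKnownB M strs).contains (pvSlc S k (k+3)) &&
            pvAGet (if (decide (k+2 ≤ M) && (pvKnownB M strs).contains (pvSlc S k (k+2)) &&
                    pvAGet dp (k+2)) = true
               then pvASet dp k true else dp) (k+3)) = true
       then pvASet
              (if (decide (k+2 ≤ M) && (pvKnownB M strs).contains (pvSlc S k (k+2)) &&
                    pvAGet dp (k+2)) = true
               then pvASet dp k true else dp) k true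
       else (if (decide (k+2 ≤ M) && (pvKnownB M strs).contains (pvSlc S k (k+2)) &&
                    pvAGet dp (k+2)) = true
             then pvASet dp k true else dp)) := rfl
  have hbody : pvDpBody (pvKnownB M strs) M S dp k =
      (if B3 = true then pvASet dp1 k true else dp1) := by
    rw [hbody0, hcond2, ← hdp1, hcond3]
  have hgood : pvGood M strs S k = (B2 || B3) := by
    rw [pvGood]
    have hne : (k == M) = false := by simp; omega
    rw [hne, Bool.false_or]
    by_cases h2 : k+2 ≤ M <;> by_cases h3 : k+3 ≤ M <;>
      simp [h2, h3, hB2, hB3]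
  constructor
  · rw [hbody]
    split <;> simp [pvASet_size, hlen1]
  · intro j hj0 hjM
    have hjlt : j.toNat < dp.size := by omega
    rw [hbody]
    cases hb3 : B3 with
    | false =>
      rw [if_neg (by simp [hb3])]
      rw [hget1 j hj0 hjlt]
      by_cases hjk : j = k
      · subst hjk
        rw [if_pos rfl, hgood, hb3, Bool.or_false]
        cases hb2 : B2 with
        | false => simp [hb2, hkf]
        | true => simp [hb2]
      · simp [hjk]
    | true =>
      rw [if_pos (by simp [hb3])]
      rw [pvAGet_set dp1 k j hk0 (by rw [hlen1]; exact hklt) hj0 (by rw [hlen1]; exact hjlt)]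
      by_cases hjk : j = k
      · subst hjk
        rw [if_pos rfl, if_pos rfl, hgood, hb3, Bool.or_true]
      · rw [if_neg hjk, if_neg hjk, hget1 j hj0 hjlt, if_neg (by rintro ⟨h, -⟩; exact hjk h)]

theorem dp_fold_inv (M : Int) (strs : List String) (S : List Char) (hM : 0 ≤ M) :
    ∀ (n : Nat) (k : Int) (dp : Array Bool), -1 ≤ k → k ≤ M - 1 → (k+1).toNat = n →
    dp.size = M.toNat + 1 →
    (∀ j : Int, 0 ≤ j → j ≤ k → pvAGet dp j = false) →
    (∀ j : Int, k < j → j ≤ M → pvAGet dp j = pvGood M strs S j) →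
    ∀ j : Int, 0 ≤ j → j ≤ M →
      pvAGet ((PySem.List.pyRange k (-1) (-1)).foldl (pvDpBody (pvKnownB M strs) M S) dp) j
        = pvGood M strs S j := by
  intro n
  induction n with
  | zero =>
    intro k dp hk1 hkM hkn hlen hfalse hgt j hj0 hjM
    have hk : k = -1 := by omega
    subst hk
    rw [PySem.List.pyRange_neg_one_eq_nil (by omega)]
    exact hgt j (by omega) hjM
  | succ n ih =>
    intro k dp hk1 hkM hkn hlen hfalse hgt j hj0 hjM
    have hk0 : 0 ≤ k := by omega
    rw [PySem.List.pyRange_neg_one_cons (by omega : (-1:Int) < k), List.foldl_cons]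
    obtain ⟨hlen', hget'⟩ := dp_body_getD M strs S hM k hk0 hkM dp hlen hgt
      (hfalse k hk0 le_rfl)
    refine ih (k-1) _ (by omega) (by omega) (by omega) (by rw [hlen']; exact hlen) ?_ ?_ j hj0 hjM
    · intro j' hj'0 hj'k
      rw [hget' j' hj'0 (by omega), if_neg (by omega)]
      exact hfalse j' hj'0 (by omega)
    · intro j' hj'k hj'M
      by_cases hjk : j' = k
      · rw [hget' j' (by omega) hj'M, if_pos hjk, hjk]
      · rw [hget' j' (by omega) hj'M, if_neg hjk]
        exact hgt j' (by omega) hj'M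

theorem dpA_getD (M : Int) (strs : List String) (S : List Char) (hM : 0 ≤ M)
    (j : Int) (hj0 : 0 ≤ j) (hj : j ≤ M) :
    pvAGet (pvDpA (pvKnownB M strs) M S) j = pvGood M strs S j := by
  unfold pvDpA
  have hsz : ((List.replicate M.toNat false ++ [true]).toArray).size = M.toNat + 1 := by
    simp
  refine dp_fold_inv M strs S hM M.toNat (M-1) _ (by omega) (by omega) (by omega)
    hsz ?_ ?_ j hj0 hj
  · intro j' hj'0 hj'M
    unfold pvAGet
    rw [dif_pos ⟨hj'0, by rw [hsz]; omega⟩]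
    rw [List.getElem_toArray]
    rw [List.getElem_append_left (by simp only [List.length_replicate]; omega)]
    simp
  · intro j' hj'k hj'M
    have hjM : j' = M := by omega
    rw [hjM]
    unfold pvAGet
    rw [dif_pos ⟨hM, by rw [hsz]; omega⟩]
    rw [List.getElem_toArray]
    have hgoodM : pvGood M strs S M = true := by rw [pvGood]; simp
    rw [hgoodM, List.getElem_append_right (by simp only [List.length_replicate]; omega)]
    simp

-- B-side machinery: the memo is faithful to pvFPure, and the stack loop terminates
-- within the provided fuel

def pvInv (M : Int) (strs : List String) (S : List Char)
    (m : Array (Option (Option PvCell))) : Prop :=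
  ∀ i v, pvMemoGet m i = some v → v = (pvFPure M strs S i).map pvToCell

-- number of unmemoized slots
def pvU (m : Array (Option (Option PvCell))) : Nat :=
  ((Finset.range m.size).filter (fun j => m[j]? = some none)).card

theorem pvLoop_nil (kn : PySem.Dict (List Char) (Int × Int × Int)) (M : Int) (S : List Char)
    (f : Nat) (memo : Array (Option (Option PvCell))) :
    pvLoop kn M S f [] memo = memo := by
  cases f <;> rfl

theorem pvLoop_succ (kn : PySem.Dict (List Char) (Int × Int × Int)) (M : Int) (S : List Char)
    (f : Nat) (i : Int) (rest : List Int) (memo : Array (Option (Option PvCell))) :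
    pvLoop kn M S (f+1) (i :: rest) memo =
      match pvMemoGet memo i with
      | some _ => pvLoop kn M S f rest memo
      | none =>
        if M ≤ i then pvLoop kn M S f rest (pvMemoSet memo i (some PvCell.nil))
        else
          let deps := pvDeps kn M S memo i
          if deps.isEmpty then
            pvLoop kn M S f rest (pvMemoSet memo i (pvResolve kn M S memo i))
          else
            pvLoop kn M S f (deps.reverse ++ i :: rest) memo := rfl

theorem pvMemoSet_size (m : Array (Option (Option PvCell))) (i : Int) (v : Option PvCell) :
    (pvMemoSet m i v).size = m.size := by
  unfold pvMemoSet; split <;> simp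

theorem pvMemoGet_set (m : Array (Option (Option PvCell))) (i j : Int) (v : Option PvCell)
    (hi0 : 0 ≤ i) (hi : i.toNat < m.size) :
    pvMemoGet (pvMemoSet m i v) j = if j = i then some v else pvMemoGet m j := by
  have hset : pvMemoSet m i v = m.set i.toNat (some v) hi := by
    unfold pvMemoSet; rw [dif_pos ⟨hi0, hi⟩]
  rw [hset]
  unfold pvMemoGet
  by_cases hj : 0 ≤ j ∧ j.toNat < m.size
  · rw [dif_pos (show 0 ≤ j ∧ j.toNat < (m.set i.toNat (some v) hi).size by simpa using hj)]
    rw [dif_pos hj]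
    rw [Array.getElem_set]
    by_cases hji : j = i
    · have : i.toNat = j.toNat := by omega
      simp [hji, this]
    · have : i.toNat ≠ j.toNat := by omega
      simp [hji, this]
  · rw [dif_neg (show ¬ (0 ≤ j ∧ j.toNat < (m.set i.toNat (some v) hi).size) by simpa using hj)]
    rw [dif_neg hj]
    have hji : j ≠ i := by
      rintro rfl; exact hj ⟨hi0, hi⟩
    simp [hji]

theorem set_getElem? (m : Array (Option (Option PvCell))) (i : Nat) (v : Option (Option PvCell))
    (hi : i < m.size) (j : Nat) :
    (m.set i v hi)[j]? = if i = j then some v else m[j]? := by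
  by_cases hj : j < m.size
  · rw [Array.getElem?_eq_getElem (by simpa using hj), Array.getElem?_eq_getElem hj]
    rw [Array.getElem_set]
    by_cases h : i = j <;> simp [h]
  · rw [Array.getElem?_eq_none (by simpa using Nat.le_of_not_lt hj),
        Array.getElem?_eq_none (Nat.le_of_not_lt hj)]
    have : i ≠ j := by omega
    simp [this]

theorem pvU_set (m : Array (Option (Option PvCell))) (i : Int) (v : Option PvCell)
    (hi0 : 0 ≤ i) (hi : i.toNat < m.size) (hnone : m[i.toNat]? = some none) :
    pvU (pvMemoSet m i v) + 1 = pvU m := by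
  unfold pvU pvMemoSet
  rw [dif_pos ⟨hi0, hi⟩]
  have hsz : (m.set i.toNat (some v) hi).size = m.size := by simp
  rw [hsz]
  have hfe : (Finset.range m.size).filter (fun j => (m.set i.toNat (some v) hi)[j]? = some none)
      = ((Finset.range m.size).filter (fun j => m[j]? = some none)).erase i.toNat := by
    ext j
    simp only [Finset.mem_erase, Finset.mem_filter, Finset.mem_range, set_getElem?]
    constructor
    · rintro ⟨hjr, hjv⟩
      by_cases hji : i.toNat = j
      · rw [if_pos hji] at hjv; cases hjv
      · rw [if_neg hji] at hjv
        exact ⟨fun h => hji h.symm, hjr, hjv⟩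
    · rintro ⟨hne, hjr, hjv⟩
      refine ⟨hjr, ?_⟩
      rw [if_neg (fun h => hne h.symm)]
      exact hjv
  rw [hfe]
  have hmem : i.toNat ∈ (Finset.range m.size).filter (fun j => m[j]? = some none) := by
    simp only [Finset.mem_filter, Finset.mem_range]
    exact ⟨hi, hnone⟩
  rw [Finset.card_erase_of_mem hmem]
  have := Finset.card_pos.mpr ⟨_, hmem⟩
  omega

theorem pvU_le (m : Array (Option (Option PvCell))) : pvU m ≤ m.size := by
  unfold pvU
  calc ((Finset.range m.size).filter _).card ≤ (Finset.range m.size).card :=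
        Finset.card_filter_le _ _
    _ = m.size := Finset.card_range _

theorem entry_none (m : Array (Option (Option PvCell))) (i : Int)
    (hi0 : 0 ≤ i) (hi : i.toNat < m.size) (h : pvMemoGet m i = none) :
    m[i.toNat]? = some none := by
  unfold pvMemoGet at h
  rw [dif_pos ⟨hi0, hi⟩] at h
  rw [Array.getElem?_eq_getElem hi, h]

-- the unrolled resolution computes pvFPure whenever every eligible child is memoized
theorem resolve3_correct (M : Int) (strs : List String) (S : List Char)
    (memo : Array (Option (Option PvCell))) (i : Int)
    (hInv : pvInv M strs S memo)
    (hdep3 : (decide (i+3 ≤ M) && pvHasKey M strs (pvSlc S i (i+3))) = true →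
      ∃ w, pvMemoGet memo (i+3) = some w) :
    pvResolve3 (pvKnownB M strs) M S memo i =
      ((if decide (i+3 ≤ M) && pvHasKey M strs (pvSlc S i (i+3)) then
          match pvFPure M strs S (i+3) with
          | some t => some ((pvKnownB M strs).getD (pvSlc S i (i+3)) (0,0,0) :: t)
          | none => none
        else none) : Option (List (Int × Int × Int))).map pvToCell := by
  unfold pvResolve3
  rw [contains_knownB]
  cases hc3 : (decide (i+3 ≤ M) && pvHasKey M strs (pvSlc S i (i+3))) with
  | false => simp
  | true =>
    obtain ⟨w, hw⟩ := hdep3 hc3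
    have hwv := hInv _ _ hw
    rw [if_pos rfl, if_pos rfl, hw, hwv]
    cases hp3 : pvFPure M strs S (i+3) with
    | some t => simp [pvToCell]
    | none => simp

theorem resolve_correct (M : Int) (strs : List String) (S : List Char)
    (memo : Array (Option (Option PvCell))) (i : Int)
    (hInv : pvInv M strs S memo) (hMi : ¬ M ≤ i)
    (hdeps : pvDeps (pvKnownB M strs) M S memo i = []) :
    pvResolve (pvKnownB M strs) M S memo i = (pvFPure M strs S i).map pvToCell := by
  have hdep : ∀ L : Int, L ∈ ([2, 3] : List Int) →
      (decide (i + L ≤ M) && pvHasKey M strs (pvSlc S i (i+L))) = true →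
      ∃ w, pvMemoGet memo (i+L) = some w := by
    intro L hL hc
    unfold pvDeps at hdeps
    rw [List.filterMap_eq_nil_iff] at hdeps
    have h := hdeps L hL
    rw [contains_knownB] at h
    cases hg : pvMemoGet memo (i+L) with
    | some w => exact ⟨w, rfl⟩
    | none =>
      exfalso
      rw [hg] at h
      rw [if_pos (by simp [hc])] at h
      cases h
  have hd3 := resolve3_correct M strs S memo i hInv (hdep 3 (by simp))
  unfold pvResolve
  rw [contains_knownB]
  rw [pvFPure, dif_neg hMi]
  cases hc2 : (decide (i+2 ≤ M) && pvHasKey M strs (pvSlc S i (i+2))) with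
  | false =>
    rw [if_neg (by simp), if_neg (by simp)]
    exact hd3
  | true =>
    obtain ⟨w, hw⟩ := hdep 2 (by simp) hc2
    have hwv := hInv _ _ hw
    rw [if_pos rfl, if_pos rfl, hw, hwv]
    cases hp2 : pvFPure M strs S (i+2) with
    | some t => simp [pvToCell]
    | none =>
      simp only [Option.map_none]
      exact hd3

-- one stack element is fully processed within fuel proportional to the number of
-- slots it newly memoizes
theorem pvProcess (M : Int) (strs : List String) (S : List Char) :
    ∀ (d : Nat) (i : Int) (rest : List Int) (memo : Array (Option (Option PvCell))),
      (M - i).toNat = d → 0 ≤ i → i.toNat ≤ M.toNat → memo.size = M.toNat + 1 →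
      pvInv M strs S memo →
      ∃ (memo' : Array (Option (Option PvCell))) (used : Nat),
        (∀ fuel : Nat, used ≤ fuel →
          pvLoop (pvKnownB M strs) M S fuel (i :: rest) memo
            = pvLoop (pvKnownB M strs) M S (fuel - used) rest memo') ∧
        pvInv M strs S memo' ∧ memo'.size = M.toNat + 1 ∧
        (pvMemoGet memo' i).isSome = true ∧
        (∀ j : Int, (pvMemoGet memo j).isSome = true → pvMemoGet memo' j = pvMemoGet memo j) ∧
        (∀ j : Int, j < i → pvMemoGet memo' j = pvMemoGet memo j) ∧
        used + 3 * pvU memo' ≤ 1 + 3 * pvU memo := by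
  intro d
  induction d using Nat.strong_induction_on with
  | _ d ih =>
    intro i rest memo hd hi0 hiM hsz hInv
    -- processing a whole list of deeper stack entries
    have aux : ∀ (ds : List Int), (∀ x ∈ ds, 0 ≤ x ∧ x.toNat ≤ M.toNat ∧ (M - x).toNat < d) →
        ∀ (rest' : List Int) (m0 : Array (Option (Option PvCell))),
        m0.size = M.toNat + 1 → pvInv M strs S m0 →
        ∃ (m1 : Array (Option (Option PvCell))) (u : Nat),
          (∀ fuel : Nat, u ≤ fuel →
            pvLoop (pvKnownB M strs) M S fuel (ds ++ rest') m0
              = pvLoop (pvKnownB M strs) M S (fuel - u) rest' m1) ∧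
          pvInv M strs S m1 ∧ m1.size = M.toNat + 1 ∧
          (∀ x ∈ ds, (pvMemoGet m1 x).isSome = true) ∧
          (∀ j : Int, (pvMemoGet m0 j).isSome = true → pvMemoGet m1 j = pvMemoGet m0 j) ∧
          (∀ j : Int, (∀ x ∈ ds, j < x) → pvMemoGet m1 j = pvMemoGet m0 j) ∧
          u + 3 * pvU m1 ≤ ds.length + 3 * pvU m0 := by
      intro ds
      induction ds with
      | nil =>
        intro _ rest' m0 hsz0 hInv0
        refine ⟨m0, 0, ?_, hInv0, hsz0, by simp, fun j _ => rfl, fun j _ => rfl, by omega⟩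
        intro fuel _
        simp
      | cons x ds' ihds =>
        intro hmem rest' m0 hsz0 hInv0
        obtain ⟨hx0, hxM, hxd⟩ := hmem x (by simp)
        obtain ⟨mA, uA, hrunA, hInvA, hszA, hsomeA, hkeepA, hlowA, hcntA⟩ :=
          ih (M - x).toNat hxd x (ds' ++ rest') m0 rfl hx0 hxM hsz0 hInv0
        obtain ⟨mB, uB, hrunB, hInvB, hszB, hsomeB, hkeepB, hlowB, hcntB⟩ :=
          ihds (fun y hy => hmem y (by simp [hy])) rest' mA hszA hInvA
        refine ⟨mB, uA + uB, ?_, hInvB, hszB, ?_, ?_, ?_, ?_⟩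
        · intro fuel hfuel
          have h1 := hrunA fuel (by omega)
          have h2 := hrunB (fuel - uA) (by omega)
          calc pvLoop (pvKnownB M strs) M S fuel ((x :: ds') ++ rest') m0
              = pvLoop (pvKnownB M strs) M S (fuel - uA) (ds' ++ rest') mA := h1
            _ = pvLoop (pvKnownB M strs) M S (fuel - uA - uB) rest' mB := h2
            _ = pvLoop (pvKnownB M strs) M S (fuel - (uA + uB)) rest' mB := by
                congr 1; omega
        · intro y hy
          rcases List.mem_cons.1 hy with rfl | hy'
          · rw [hkeepB y hsomeA]
            exact hsomeA
          · exact hsomeB y hy'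
        · intro j hj
          rw [hkeepB j (by rw [hkeepA j hj]; exact hj), hkeepA j hj]
        · intro j hj
          rw [hlowB j (fun y hy => hj y (by simp [hy])), hlowA j (hj x (by simp))]
        · have hl : (x :: ds').length = ds'.length + 1 := by simp
          omega
    -- now the head element i
    cases hgi : pvMemoGet memo i with
    | some v =>
      refine ⟨memo, 1, ?_, hInv, hsz, by rw [hgi]; rfl, fun j _ => rfl, fun j _ => rfl, by omega⟩
      intro fuel hfuel
      obtain ⟨f, rfl⟩ : ∃ f, fuel = f + 1 := ⟨fuel - 1, by omega⟩
      rw [pvLoop_succ, hgi]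
      congr 1
    | none =>
      have hibnd : i.toNat < memo.size := by omega
      have hent := entry_none memo i hi0 hibnd hgi
      by_cases hMi : M ≤ i
      · -- base: memo[i] = ()
        set memo' := pvMemoSet memo i (some PvCell.nil) with hm'
        have hget' := fun j => pvMemoGet_set memo i j (some PvCell.nil) hi0 hibnd
        have hU : pvU memo' + 1 = pvU memo := by
          rw [hm']; exact pvU_set memo i (some PvCell.nil) hi0 hibnd hent
        refine ⟨memo', 1, ?_, ?_, by rw [hm', pvMemoSet_size]; exact hsz, ?_, ?_, ?_, by omega⟩
        · intro fuel hfuel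
          obtain ⟨f, rfl⟩ : ∃ f, fuel = f + 1 := ⟨fuel - 1, by omega⟩
          rw [pvLoop_succ, hgi]
          simp only [if_pos hMi]
          congr 1
        · intro j w hw
          rw [hget' j] at hw
          by_cases hji : j = i
          · rw [if_pos hji] at hw
            cases hw
            rw [hji, pvFPure, dif_pos hMi]
            rfl
          · rw [if_neg hji] at hw
            exact hInv j w hw
        · rw [hget' i, if_pos rfl]
          rfl
        · intro j hj
          rw [hget' j]
          have hji : j ≠ i := by
            intro h; rw [h, hgi] at hj; cases hj
          rw [if_neg hji]
        · intro j hj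
          rw [hget' j, if_neg (by omega)]
      · -- i < M
        have hiMlt : i < M := by omega
        have hd1 : 1 ≤ d := by omega
        cases hde : (pvDeps (pvKnownB M strs) M S memo i).isEmpty with
        | true =>
          -- resolve immediately
          have hdnil : pvDeps (pvKnownB M strs) M S memo i = [] :=
            List.isEmpty_iff.1 hde
          set r := pvResolve (pvKnownB M strs) M S memo i with hr
          have hrv : r = (pvFPure M strs S i).map pvToCell :=
            resolve_correct M strs S memo i hInv hMi hdnil
          set memo' := pvMemoSet memo i r with hm'
          have hget' := fun j => pvMemoGet_set memo i j r hi0 hibnd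
          have hU : pvU memo' + 1 = pvU memo := by
            rw [hm']; exact pvU_set memo i r hi0 hibnd hent
          refine ⟨memo', 1, ?_, ?_, by rw [hm', pvMemoSet_size]; exact hsz, ?_, ?_, ?_, by omega⟩
          · intro fuel hfuel
            obtain ⟨f, rfl⟩ : ∃ f, fuel = f + 1 := ⟨fuel - 1, by omega⟩
            rw [pvLoop_succ, hgi]
            simp only [if_neg hMi, hde, if_pos rfl]
            congr 1
          · intro j w hw
            rw [hget' j] at hw
            by_cases hji : j = i
            · rw [if_pos hji] at hw
              cases hw
              rw [hji, ← hrv]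
            · rw [if_neg hji] at hw
              exact hInv j w hw
          · rw [hget' i, if_pos rfl]
            rfl
          · intro j hj
            rw [hget' j]
            have hji : j ≠ i := by
              intro h; rw [h, hgi] at hj; cases hj
            rw [if_neg hji]
          · intro j hj
            rw [hget' j, if_neg (by omega)]
        | false =>
          -- push deps, process them, revisit i
          set deps := pvDeps (pvKnownB M strs) M S memo i with hdeps
          have hdep_shape : ∀ x ∈ deps, (x = i+2 ∨ x = i+3) ∧ x ≤ M ∧
              (pvMemoGet memo x).isNone = true := by
            intro x hx
            rw [hdeps] at hx
            unfold pvDeps at hx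
            rw [List.mem_filterMap] at hx
            obtain ⟨L, hL, hfx⟩ := hx
            split at hfx
            · rename_i hcond
              cases hfx
              simp only [Bool.and_eq_true, decide_eq_true_eq] at hcond
              rcases List.mem_cons.1 hL with rfl | hL'
              · exact ⟨Or.inl rfl, hcond.1.1, hcond.2⟩
              · rcases List.mem_cons.1 hL' with rfl | h
                · exact ⟨Or.inr rfl, hcond.1.1, hcond.2⟩
                · cases h
            · cases hfx
          have hdmem : ∀ x ∈ deps.reverse, 0 ≤ x ∧ x.toNat ≤ M.toNat ∧ (M - x).toNat < d := by
            intro x hx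
            obtain ⟨hsh, hxM, _⟩ := hdep_shape x (List.mem_reverse.1 hx)
            rcases hsh with rfl | rfl
            · exact ⟨by omega, by omega, by omega⟩
            · exact ⟨by omega, by omega, by omega⟩
          obtain ⟨m2, u1, hrun1, hInv2, hsz2, hsome2, hkeep2, hlow2, hcnt2⟩ :=
            aux deps.reverse hdmem (i :: rest) memo hsz hInv
          have hlow2' : ∀ j : Int, j ≤ i → pvMemoGet m2 j = pvMemoGet memo j := by
            intro j hj
            refine hlow2 j ?_
            intro x hx
            obtain ⟨hsh, -, -⟩ := hdep_shape x (List.mem_reverse.1 hx)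
            rcases hsh with rfl | rfl <;> omega
          have hg2i : pvMemoGet m2 i = none := by
            rw [hlow2' i le_rfl]; exact hgi
          have hent2 : m2[i.toNat]? = some none :=
            entry_none m2 i hi0 (by omega) hg2i
          have hd2nil : pvDeps (pvKnownB M strs) M S m2 i = [] := by
            unfold pvDeps
            rw [List.filterMap_eq_nil_iff]
            intro L hL
            cases hcond : (decide (i + L ≤ M) && (pvKnownB M strs).contains (pvSlc S i (i+L))) with
            | false => simp
            | true =>
              have hsomeL : (pvMemoGet m2 (i+L)).isSome = true := by
                cases hgL : (pvMemoGet memo (i+L)).isNone with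
                | true =>
                  -- i+L was a dep
                  have hmemdep : (i + L) ∈ deps := by
                    rw [hdeps]
                    unfold pvDeps
                    rw [List.mem_filterMap]
                    exact ⟨L, hL, by rw [if_pos (by simp [hcond, hgL])]⟩
                  exact hsome2 (i+L) (List.mem_reverse.2 hmemdep)
                | false =>
                  have hs : (pvMemoGet memo (i+L)).isSome = true := by
                    cases h : pvMemoGet memo (i+L) with
                    | none => rw [h] at hgL; cases hgL
                    | some _ => rfl
                  rw [hkeep2 (i+L) hs]
                  exact hs
              rw [if_neg (by
                intro hc
                simp only [Bool.and_eq_true] at hc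
                rw [Option.isNone_iff_eq_none] at hc
                rw [hc.2] at hsomeL
                cases hsomeL)]
          set r := pvResolve (pvKnownB M strs) M S m2 i with hr
          have hrv : r = (pvFPure M strs S i).map pvToCell :=
            resolve_correct M strs S m2 i hInv2 hMi hd2nil
          set memo' := pvMemoSet m2 i r with hm'
          have hget' := fun j => pvMemoGet_set m2 i j r hi0 (by omega)
          have hU : pvU memo' + 1 = pvU m2 := by
            rw [hm']; exact pvU_set m2 i r hi0 (by omega) hent2
          have hlen_deps : deps.length ≤ 2 := by
            have : deps.length ≤ ([2, 3] : List Int).length := by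
              rw [hdeps]; unfold pvDeps; exact List.length_filterMap_le _ _
            simpa using this
          refine ⟨memo', u1 + 2, ?_, ?_, by rw [hm', pvMemoSet_size]; exact hsz2, ?_, ?_, ?_, ?_⟩
          · intro fuel hfuel
            obtain ⟨f, rfl⟩ : ∃ f, fuel = f + 1 := ⟨fuel - 1, by omega⟩
            rw [pvLoop_succ, hgi]
            simp only [if_neg hMi]
            rw [show (pvDeps (pvKnownB M strs) M S memo i) = deps from hdeps.symm]
            rw [if_neg (show ¬ (deps.isEmpty = true) by simp [hde])]
            rw [hrun1 f (by omega)]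
            obtain ⟨g, hg⟩ : ∃ g, f - u1 = g + 1 := ⟨f - u1 - 1, by omega⟩
            rw [hg, pvLoop_succ, hg2i]
            simp only [if_neg hMi, hd2nil, List.isEmpty_nil, if_pos rfl]
            rw [← hr, ← hm']
            have hgf : g = f + 1 - (u1 + 2) := by omega
            rw [hgf]
            simp
          · intro j w hw
            rw [hget' j] at hw
            by_cases hji : j = i
            · rw [if_pos hji] at hw
              cases hw
              rw [hji, ← hrv]
            · rw [if_neg hji] at hw
              exact hInv2 j w hw
          · rw [hget' i, if_pos rfl]
            rfl
          · intro j hj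
            rw [hget' j]
            have hji : j ≠ i := by
              intro h; rw [h, hgi] at hj; cases hj
            rw [if_neg hji]
            exact hkeep2 j hj
          · intro j hj
            rw [hget' j, if_neg (by omega)]
            exact hlow2' j (by omega)
          · have hrl : deps.reverse.length = deps.length := by simp
            omega

theorem pvFinal (M : Int) (strs : List String) (S : List Char) :
    (pvMemoGet (pvLoop (pvKnownB M strs) M S (3 * (M.toNat + 2)) [0]
        (Array.replicate (M.toNat + 1) none)) 0).getD none
      = (pvFPure M strs S 0).map pvToCell := by
  have hInv0 : pvInv M strs S (Array.replicate (M.toNat + 1) none) := by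
    intro i v hv
    unfold pvMemoGet at hv
    split at hv
    · rw [Array.getElem_replicate] at hv
      cases hv
    · cases hv
  obtain ⟨memo', used, hrun, hInv, hsz, hsome, _, _, hcnt⟩ :=
    pvProcess M strs S (M - 0).toNat 0 [] (Array.replicate (M.toNat + 1) none) rfl le_rfl
      (by simp) (by simp) hInv0
  have hU0 : pvU (Array.replicate (M.toNat + 1) none) ≤ M.toNat + 1 := by
    have := pvU_le (Array.replicate (M.toNat + 1) (none : Option (Option PvCell)))
    simpa using this
  have hfuel : used ≤ 3 * (M.toNat + 2) := by omega
  rw [hrun _ hfuel, pvLoop_nil]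
  cases hg : pvMemoGet memo' 0 with
  | none => rw [hg] at hsome; cases hsome
  | some v =>
    rw [hInv 0 v hg]
    rfl

-- ===== VERDICT (by name: the statement is the Claim_ definition above) =====
theorem solve_spec : Claim_equal_solve := by
  unfold Claim_equal_solve
  intro N M strs S _
  unfold Spec_solve
  show solve N M strs S = solve_alt N M strs S
  have hA : solve N M strs S =
      (if !(pvAGet (pvDpA (pvKnownA M strs) M S.toList) 0) then ((-1 : Int), ([] : List (Int × Int × Int)))
       else (((pvWalkA (pvKnownA M strs) (pvDpA (pvKnownA M strs) M S.toList) M S.toList 0 []).length : Int),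
              pvWalkA (pvKnownA M strs) (pvDpA (pvKnownA M strs) M S.toList) M S.toList 0 [])) := rfl
  have hB : solve_alt N M strs S =
      (match (pvMemoGet (pvLoop (pvKnownB M strs) M S.toList (3 * (M.toNat + 2)) [0]
                (Array.replicate (M.toNat + 1) none)) 0).getD none with
       | none => ((-1 : Int), ([] : List (Int × Int × Int)))
       | some c => (((pvFlatten c).length : Int), pvFlatten c)) := rfl
  rw [hA, hB, known_eq, pvFinal]
  by_cases hMneg : M < 0
  · -- degenerate negative M: both programs return (0, [])
    have hM0 : M.toNat = 0 := by omega
    have hdp : pvDpA (pvKnownB M strs) M S.toList = #[true] := by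
      unfold pvDpA
      rw [PySem.List.pyRange_neg_one_eq_nil (by omega)]
      rw [List.foldl_nil, hM0]
      rfl
    have hfp : pvFPure M strs S.toList 0 = some [] := by
      rw [pvFPure, dif_pos (by omega : M ≤ (0 : Int))]
    rw [hdp, hfp]
    have hg0 : pvAGet #[true] 0 = true := by decide
    rw [hg0]
    rw [if_neg (by simp)]
    rw [pvWalkA, dif_neg (by omega)]
    rfl
  · have hM : 0 ≤ M := by omega
    have hdp := fun j hj0 hjM => dpA_getD M strs S.toList hM j hj0 hjM
    have hA0 : pvAGet (pvDpA (pvKnownB M strs) M S.toList) 0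
        = pvGood M strs S.toList 0 := hdp 0 (by omega) hM
    have hsome0 : (pvFPure M strs S.toList 0).isSome = pvGood M strs S.toList 0 :=
      pvFPure_isSome M strs S.toList _ 0 rfl (by omega) hM
    cases hg0 : pvGood M strs S.toList 0 with
    | true =>
      obtain ⟨r, hr⟩ : ∃ r, pvFPure M strs S.toList 0 = some r := by
        cases hp : pvFPure M strs S.toList 0 with
        | some r => exact ⟨r, rfl⟩
        | none => rw [hp, hg0] at hsome0; simp at hsome0
      rw [hA0, hg0, hr]
      rw [if_neg (by simp)]
      have hw := walk_eq_pure M strs S.toList hM (pvDpA (pvKnownB M strs) M S.toList) hdp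
        (M - 0).toNat 0 [] rfl (by omega) hM hg0
      rw [hw, hr]
      simp [pvFlatten_toCell]
    | false =>
      have hfp : pvFPure M strs S.toList 0 = none := by
        cases hp : pvFPure M strs S.toList 0 with
        | some r => rw [hp, hg0] at hsome0; simp at hsome0
        | none => rfl
      rw [hA0, hg0, hfp]
      rw [if_pos (by simp)]
      rfl
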